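-- pv_equiv track=rewrite | github.com/eastgrand/doc | scripts/automation/intelligent_field_mapper.py | _are_synonymous
-- ===== SOURCE A (Python) =====
-- def _are_synonymous(source_field: str, target_field: str) -> bool:
--     """Check if fields are synonymous using common abbreviations and patterns"""
--
--     synonyms = {
--         'pop': ['population', 'people'],
--         'hh': ['household', 'house'],
--         'inc': ['income', 'earnings'],
--         'pct': ['percent', 'percentage'],
--         'desc': ['description', 'name'],
--         'geo': ['geographic', 'geography'],
--         'mp': ['market_share', 'market'],
--         'val': ['value', 'amount']
--     }
--
--     source_lower = source_field.lower()
--     target_lower = target_field.lower()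
--
--     # Check direct synonyms
--     for abbrev, full_words in synonyms.items():
--         if abbrev in source_lower:
--             if any(word in target_lower for word in full_words):
--                 return True
--
--         for word in full_words:
--             if word in source_lower and abbrev in target_lower:
--                 return True
--
--     return False
-- ===== SOURCE B (Python) =====
-- def _are_synonymous(source_field: str, target_field: str) -> bool:
--     """Check if fields are synonymous using common abbreviations and patterns"""
--
--     synonyms = {
--         'pop': ['population', 'people'],
--         'hh': ['household', 'house'],
--         'inc': ['income', 'earnings'],
--         'pct': ['percent', 'percentage'],
--         'desc': ['description', 'name'],
--         'geo': ['geographic', 'geography'],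
--         'mp': ['market_share', 'market'],
--         'val': ['value', 'amount']
--     }
--     groups = list(synonyms.items())
--
--     # Stage 1: tag each field with the indices of the synonym groups whose
--     # abbreviation (resp. one of whose full words) occurs in it.
--     def tags(text):
--         t = text.lower()
--         abbr_hits = [i for i, (abbrev, _) in enumerate(groups) if abbrev in t]
--         word_hits = [i for i, (_, words) in enumerate(groups) if any(w in t for w in words)]
--         return abbr_hits, word_hits
--
--     src_abbr, src_word = tags(source_field)
--     tgt_abbr, tgt_word = tags(target_field)
--
--     # Stage 2: the fields are synonymous iff some group's abbreviation tag on one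
--     # side meets the same group's full-word tag on the other side.
--     return any(i in tgt_word for i in src_abbr) or any(i in src_word for i in tgt_abbr)
-- ===== Notes on version B (the rewrite author's own statement) =====
-- stated objective: alternative
-- what changed: Replaces A's single interleaved loop of per-entry direct/reverse substring checks with early returns by a staged index-building pass: each field is first tagged with the lists of synonym-group indices it hits as an abbreviation and as a full word, and the result is the non-empty intersection of one side's abbreviation tags with the other side's full-word tags (in either direction).
import Mathlib
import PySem

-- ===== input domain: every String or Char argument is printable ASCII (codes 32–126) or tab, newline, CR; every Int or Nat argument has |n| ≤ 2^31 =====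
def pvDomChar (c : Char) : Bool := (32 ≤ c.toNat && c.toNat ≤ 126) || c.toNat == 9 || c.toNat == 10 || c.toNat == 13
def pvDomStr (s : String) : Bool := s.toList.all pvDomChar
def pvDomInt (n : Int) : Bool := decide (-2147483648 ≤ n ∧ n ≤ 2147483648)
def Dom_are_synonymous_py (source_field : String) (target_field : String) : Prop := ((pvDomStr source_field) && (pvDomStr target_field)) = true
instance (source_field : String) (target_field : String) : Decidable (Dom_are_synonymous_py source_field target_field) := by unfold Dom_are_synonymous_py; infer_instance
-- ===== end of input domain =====

-- B replaces A's interleaved per-entry direct/reverse substring checks by a staged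
-- tagging pass: each field is first tagged with the group indices it hits (as
-- abbreviation and as full word), then the two tag lists are intersected (alternative
-- decomposition; same cost).

-- the synonyms dict (shared fixed data of both programs)
def pvSynonyms : List (String × List String) :=
  [("pop", ["population", "people"]),
   ("hh", ["household", "house"]),
   ("inc", ["income", "earnings"]),
   ("pct", ["percent", "percentage"]),
   ("desc", ["description", "name"]),
   ("geo", ["geographic", "geography"]),
   ("mp", ["market_share", "market"]),
   ("val", ["value", "amount"])]

-- ===== PORT A =====
-- A's loop over the dict: per entry, the direct check ('abr in source and some
-- full word in target': return True), then the inner 'for word' loop of reverse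
-- checks; early 'return True' is the || of the tests with the rest of the loop.
def pvLoopA (sl : String) (tl : String) : List (String × List String) → Bool
  | [] => false
  | (abr, full_words) :: rest =>
    (PySem.Str.isIn abr sl && full_words.any (fun word => PySem.Str.isIn word tl))
    || full_words.any (fun word => PySem.Str.isIn word sl && PySem.Str.isIn abr tl)
    || pvLoopA sl tl rest

def are_synonymous_py (source_field : String) (target_field : String) : Bool :=
  let source_lower := PySem.Str.lower source_field
  let target_lower := PySem.Str.lower target_field
  pvLoopA source_lower target_lower pvSynonyms

-- ===== PORT B =====
-- stage 1 of Source B: tag a field with the indices of the groups whose abbreviation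
-- (resp. one of whose full words) occurs in it
def pvTags (text : String) : List Int × List Int :=
  let t := PySem.Str.lower text
  let abbr_hits :=
    ((PySem.List.enumerate pvSynonyms).filter (fun p => PySem.Str.isIn p.2.1 t)).map (·.1)
  let word_hits :=
    ((PySem.List.enumerate pvSynonyms).filter (fun p => p.2.2.any (fun w => PySem.Str.isIn w t))).map (·.1)
  (abbr_hits, word_hits)

-- stage 2 of Source B: intersect abbreviation tags of one side with full-word tags of the other
def are_synonymous_py_alt (source_field : String) (target_field : String) : Bool :=
  let st := pvTags source_field
  let tt := pvTags target_field
  st.1.any (fun i => tt.2.contains i) || tt.1.any (fun i => st.2.contains i)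

-- ===== PRECONDITION & SPEC =====
def Spec_are_synonymous_py (source_field : String) (target_field : String) (out : Bool) : Prop := out = are_synonymous_py_alt source_field target_field
instance (source_field : String) (target_field : String) (out : Bool) : Decidable (Spec_are_synonymous_py source_field target_field out) := by unfold Spec_are_synonymous_py; infer_instance

-- ===== CLAIM (what is proved, stated in full; the proofs are below) =====
def Claim_equal_are_synonymous_py : Prop := ∀ (source_field : String) (target_field : String), Dom_are_synonymous_py source_field target_field → Spec_are_synonymous_py source_field target_field (are_synonymous_py source_field target_field)

-- ===== LEMMAS AND PROOFS =====

-- any (p x && c) = any p && c for a constant c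
theorem pv_any_and_const {α : Type} (l : List α) (p : α → Bool) (c : Bool) :
    l.any (fun x => p x && c) = (l.any p && c) := by
  cases c <;> simp

-- Bool shuffle: interleaved disjunction = disjunction of the two halves
theorem pv_or_shuffle (a b c d : Bool) : (a || b || (c || d)) = ((a || c) || (b || d)) := by
  cases a <;> cases b <;> cases c <;> cases d <;> rfl

-- A's loop is the disjunction of two one-directional passes over the same list
theorem pvLoopA_eq (sl tl : String) (l : List (String × List String)) :
    pvLoopA sl tl l =
      (l.any (fun p => PySem.Str.isIn p.1 sl && p.2.any (fun w => PySem.Str.isIn w tl))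
       || l.any (fun p => PySem.Str.isIn p.1 tl && p.2.any (fun w => PySem.Str.isIn w sl))) := by
  induction l with
  | nil => rfl
  | cons a t ih =>
    obtain ⟨abr, words⟩ := a
    rw [pvLoopA, List.any_cons, List.any_cons, pv_any_and_const, ih,
        Bool.and_comm (words.any fun w => PySem.Str.isIn w sl) (PySem.Str.isIn abr tl),
        pv_or_shuffle]

-- intersecting the filtered-index tags over the same enumeration is one fused pass:
-- some index satisfies both predicates iff some list element satisfies both
theorem pv_tags_meet {α : Type} (l : List α) (p q : α → Bool) :
    (((PySem.List.enumerate l).filter (fun x => p x.2)).map (·.1)).any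
      (fun i => (((PySem.List.enumerate l).filter (fun x => q x.2)).map (·.1)).contains i)
      = l.any (fun g => p g && q g) := by
  rw [Bool.eq_iff_iff, List.any_eq_true, List.any_eq_true]
  constructor
  · rintro ⟨i, hi, hc⟩
    rw [List.mem_map] at hi
    obtain ⟨x, hx, hxi⟩ := hi
    rw [List.mem_filter] at hx
    obtain ⟨hx, hpx⟩ := hx
    rw [List.contains_eq_mem, decide_eq_true_iff, List.mem_map] at hc
    obtain ⟨y, hy, hyi⟩ := hc
    rw [List.mem_filter] at hy
    obtain ⟨hy, hqy⟩ := hy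
    rw [PySem.List.mem_enumerate_iff] at hx hy
    obtain ⟨k, hk, hxk⟩ := hx
    obtain ⟨k', hk', hyk⟩ := hy
    have h1 : x.1 = ((k : Int)) := by rw [hxk]; simp
    have h2 : y.1 = ((k' : Int)) := by rw [hyk]; simp
    have hyx : y.1 = x.1 := hyi.trans hxi.symm
    have hkk : ((k' : Int)) = ((k : Int)) := by rw [← h1, ← h2]; exact hyx
    have hkk' : k' = k := by exact_mod_cast hkk
    refine ⟨l[k], List.getElem_mem hk, ?_⟩
    have hpx' : p (l[k]) = true := by rw [hxk] at hpx; exact hpx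
    have hqy' : q (l[k]) = true := by subst hkk'; rw [hyk] at hqy; exact hqy
    simp [hpx', hqy']
  · rintro ⟨g, hg, hpq⟩
    rw [List.mem_iff_getElem] at hg
    obtain ⟨k, hk, hgk⟩ := hg
    simp only [Bool.and_eq_true] at hpq
    obtain ⟨hpg, hqg⟩ := hpq
    have hmem : ((0 : Int) + k, l[k]) ∈ PySem.List.enumerate l 0 :=
      (PySem.List.mem_enumerate_iff l 0 _).mpr ⟨k, hk, rfl⟩
    refine ⟨(0 : Int) + k, ?_, ?_⟩
    · rw [List.mem_map]
      exact ⟨((0 : Int) + k, l[k]), List.mem_filter.mpr ⟨hmem, by simp [hgk, hpg]⟩, rfl⟩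
    · rw [List.contains_eq_mem, decide_eq_true_iff, List.mem_map]
      exact ⟨((0 : Int) + k, l[k]), List.mem_filter.mpr ⟨hmem, by simp [hgk, hqg]⟩, rfl⟩

-- ===== VERDICT (by name: the statement is the Claim_ definition above) =====
theorem are_synonymous_py_spec : Claim_equal_are_synonymous_py := by
  intro s t _
  unfold Spec_are_synonymous_py are_synonymous_py are_synonymous_py_alt pvTags
  simp only []
  rw [pvLoopA_eq,
      pv_tags_meet pvSynonyms
        (fun g => PySem.Str.isIn g.1 (PySem.Str.lower s))
        (fun g => g.2.any (fun w => PySem.Str.isIn w (PySem.Str.lower t))),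
      pv_tags_meet pvSynonyms
        (fun g => PySem.Str.isIn g.1 (PySem.Str.lower t))
        (fun g => g.2.any (fun w => PySem.Str.isIn w (PySem.Str.lower s)))]
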